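-- pv_equiv track=rewrite | github.com/mr283k/prog-wk | Easytrieve V1.8.py | detailsExtraction
-- ===== SOURCE A (Python) =====
-- def detailsExtraction(lineNos, loopList):
--     outLines = []
--     for lineNo in lineNos:
--         outLines.append(lineNo)
--         linesWithLP = filter(lambda inL:inL,
--                              map(lambda inLP: inLP if inLP[0] <= lineNo <= inLP[-1] else None, loopList))
--         outLines += [inL for subL in linesWithLP for inL in subL]
--     outLines = sorted(set(outLines))
--     return outLines
-- ===== SOURCE B (Python) =====
-- def _bis(xs, t, lo, hi):
--     # first index i in [lo, hi) with xs[i] >= t, else hi (xs sorted ascending)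
--     if lo < hi:
--         mid = (lo + hi) // 2
--         if xs[mid] < t:
--             return _bis(xs, t, mid + 1, hi)
--         return _bis(xs, t, lo, mid)
--     return lo
--
--
-- def detailsExtraction(lineNos, loopList):
--     sln = sorted(lineNos)
--     out = set(lineNos)
--     for loop in loopList:
--         i = _bis(sln, loop[0], 0, len(sln))
--         if i < len(sln) and sln[i] <= loop[-1]:
--             out.update(loop)
--     return sorted(out)
-- ===== Notes on version B (the rewrite author's own statement) =====
-- stated objective: faster
-- what changed: Instead of scanning every loop for every lineNo, B sorts lineNos once and for each loop does one binary search to decide whether any lineNo falls in [loop[0], loop[-1]], collecting results in a set built once.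
-- outside the precondition, e.g. on detailsExtraction([], [[]]): A returns [], B raises IndexError
import Mathlib
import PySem

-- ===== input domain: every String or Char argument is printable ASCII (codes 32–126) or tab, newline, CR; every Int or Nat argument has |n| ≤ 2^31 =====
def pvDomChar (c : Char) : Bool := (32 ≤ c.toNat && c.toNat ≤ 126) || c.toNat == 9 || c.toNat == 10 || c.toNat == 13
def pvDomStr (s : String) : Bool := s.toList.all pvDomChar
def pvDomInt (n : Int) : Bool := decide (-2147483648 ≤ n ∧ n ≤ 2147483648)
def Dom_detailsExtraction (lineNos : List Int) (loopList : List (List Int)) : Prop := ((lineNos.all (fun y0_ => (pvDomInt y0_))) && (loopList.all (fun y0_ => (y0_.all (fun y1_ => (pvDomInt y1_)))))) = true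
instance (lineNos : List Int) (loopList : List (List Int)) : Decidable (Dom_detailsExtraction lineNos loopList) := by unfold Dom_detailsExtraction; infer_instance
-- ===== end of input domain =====

-- B replaces A's per-lineNo scan of all loops by one sort of lineNos plus one binary search
-- per loop (objective: faster).

-- ===== PORT A =====
-- body of A's 'for lineNo in lineNos' loop: append lineNo, then all elements of the loops
-- whose [first, last] range contains lineNo (Python's truthy filter on the mapped Options)
def pvABody (loopList : List (List Int)) (acc : List Int) (lineNo : Int) : List Int :=
  let linesWithLP : List (Option (List Int)) :=
    (loopList.map (fun inLP =>
      if PySem.List.pyGetD inLP 0 0 ≤ lineNo ∧ lineNo ≤ PySem.List.pyGetD inLP (-1) 0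
      then some inLP else none)).filter (fun o => !(o.getD []).isEmpty)
  (acc ++ [lineNo]) ++ linesWithLP.flatMap (fun o => o.getD [])

def detailsExtraction (lineNos : List Int) (loopList : List (List Int)) : List Int :=
  let outLines := lineNos.foldl (pvABody loopList) []
  PySem.List.sorted (PySem.Set.ofList outLines) (fun x => x) false

-- ===== PORT B =====
-- hand-written bisect from Source B: first index i in [lo, hi) with xs[i] >= t, else hi
def pvBis (xs : List Int) (t : Int) (lo hi : Nat) : Nat :=
  if h : lo < hi then
    let mid := (lo + hi) / 2
    if PySem.List.pyGetD xs (mid : Int) 0 < t then pvBis xs t (mid + 1) hi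
    else pvBis xs t lo mid
  else lo
termination_by hi - lo
decreasing_by all_goals omega

def detailsExtraction_alt (lineNos : List Int) (loopList : List (List Int)) : List Int :=
  let sln := PySem.List.sorted lineNos (fun x => x) false
  let out := loopList.foldl (fun out loop =>
    let i := pvBis sln (PySem.List.pyGetD loop 0 0) 0 sln.length
    if i < sln.length ∧ PySem.List.pyGetD sln (i : Int) 0 ≤ PySem.List.pyGetD loop (-1) 0
    then PySem.Set.update out loop else out) (PySem.Set.ofList lineNos)
  PySem.List.sorted out (fun x => x) false

-- ===== PRECONDITION & SPEC =====
-- Pre_ excludes empty loops: A raises IndexError on loop[0] whenever lineNos is nonempty, and B raises there even for empty lineNos (where A happens to return [] because its loop body never runs).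
def Pre_detailsExtraction (lineNos : List Int) (loopList : List (List Int)) : Prop :=
  ∀ loop ∈ loopList, loop ≠ []
instance (lineNos : List Int) (loopList : List (List Int)) : Decidable (Pre_detailsExtraction lineNos loopList) := by unfold Pre_detailsExtraction; infer_instance

def pvWitness_detailsExtraction : List Int × List (List Int) := ([3, 1, 7], [[2, 5], [10, 12]])

def Spec_detailsExtraction (lineNos : List Int) (loopList : List (List Int)) (out : List Int) : Prop := out = detailsExtraction_alt lineNos loopList
instance (lineNos : List Int) (loopList : List (List Int)) (out : List Int) : Decidable (Spec_detailsExtraction lineNos loopList out) := by unfold Spec_detailsExtraction; infer_instance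

-- ===== CLAIM (what is proved, stated in full; the proofs are below) =====
def Claim_equal_detailsExtraction : Prop := ∀ (lineNos : List Int) (loopList : List (List Int)), Dom_detailsExtraction lineNos loopList → Pre_detailsExtraction lineNos loopList → Spec_detailsExtraction lineNos loopList (detailsExtraction lineNos loopList)

-- ===== LEMMAS AND PROOFS =====

-- one step of A's loop, as a membership statement
theorem pvABody_mem (loopList : List (List Int)) (hne : ∀ lp ∈ loopList, lp ≠ [])
    (acc : List Int) (y x : Int) :
    x ∈ pvABody loopList acc y ↔
      x ∈ acc ∨ x = y ∨ ∃ lp ∈ loopList,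
        (PySem.List.pyGetD lp 0 0 ≤ y ∧ y ≤ PySem.List.pyGetD lp (-1) 0) ∧ x ∈ lp := by
  simp only [pvABody, List.mem_append, List.mem_singleton, List.mem_flatMap, List.mem_filter,
    List.mem_map, or_assoc]
  apply or_congr_right; apply or_congr_right
  constructor
  · rintro ⟨o, ⟨⟨lp, hlp, ho⟩, htruthy⟩, hx⟩
    split_ifs at ho with hc
    · subst ho; exact ⟨lp, hlp, hc, by simpa using hx⟩
    · subst ho; simp at htruthy
  · rintro ⟨lp, hlp, hc, hx⟩
    refine ⟨some lp, ⟨⟨lp, hlp, by simp [hc]⟩, ?_⟩, by simpa using hx⟩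
    simpa using List.isEmpty_eq_false_iff.mpr (hne lp hlp)

-- membership in A's accumulated output list
theorem pvA_mem (loopList : List (List Int)) (hne : ∀ lp ∈ loopList, lp ≠ [])
    (lineNos : List Int) (acc : List Int) (x : Int) :
    x ∈ lineNos.foldl (pvABody loopList) acc ↔
      x ∈ acc ∨ x ∈ lineNos ∨ ∃ lp ∈ loopList,
        (∃ y ∈ lineNos, PySem.List.pyGetD lp 0 0 ≤ y ∧ y ≤ PySem.List.pyGetD lp (-1) 0) ∧ x ∈ lp := by
  induction lineNos generalizing acc with
  | nil => simp
  | cons y ys ih =>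
    rw [List.foldl_cons, ih, pvABody_mem loopList hne]
    constructor
    · rintro ((h | h | ⟨lp, hlp, hc, hx⟩) | h | ⟨lp, hlp, ⟨z, hz, hc⟩, hx⟩)
      · exact .inl h
      · exact .inr (.inl (by simp [h]))
      · exact .inr (.inr ⟨lp, hlp, ⟨y, by simp, hc⟩, hx⟩)
      · exact .inr (.inl (by simp [h]))
      · exact .inr (.inr ⟨lp, hlp, ⟨z, by simp [hz], hc⟩, hx⟩)
    · rintro (h | h | ⟨lp, hlp, ⟨z, hz, hc⟩, hx⟩)
      · exact .inl (.inl h)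
      · rcases List.mem_cons.mp h with h | h
        · exact .inl (.inr (.inl h))
        · exact .inr (.inl h)
      · rcases List.mem_cons.mp hz with h | h
        · exact .inl (.inr (.inr ⟨lp, hlp, by simpa [h] using hc, hx⟩))
        · exact .inr (.inr ⟨lp, hlp, ⟨z, h, hc⟩, hx⟩)

-- membership in B's fold (the per-loop test abstracted)
theorem pvB_mem (cond : List Int → Prop) [DecidablePred cond]
    (loopList : List (List Int)) (init : List Int) (x : Int) :
    x ∈ loopList.foldl (fun out lp => if cond lp then PySem.Set.update out lp else out) init ↔
      x ∈ init ∨ ∃ lp ∈ loopList, cond lp ∧ x ∈ lp := by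
  induction loopList generalizing init with
  | nil => simp
  | cons lp lps ih =>
    rw [List.foldl_cons, ih]
    by_cases hc : cond lp
    · simp [hc, PySem.Set.mem_update, or_assoc]
    · simp [hc]

-- B's fold preserves Nodup
theorem pvB_nodup (cond : List Int → Prop) [DecidablePred cond]
    (loopList : List (List Int)) (init : List Int) (h : init.Nodup) :
    (loopList.foldl (fun out lp => if cond lp then PySem.Set.update out lp else out) init).Nodup := by
  induction loopList generalizing init with
  | nil => exact h
  | cons lp lps ih =>
    rw [List.foldl_cons]
    by_cases hc : cond lp
    · simp only [if_pos hc]; exact ih _ (PySem.Set.nodup_update _ _ h)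
    · simp only [if_neg hc]; exact ih _ h

theorem pvGd_eq (xs : List Int) (j : Nat) (hj : j < xs.length) :
    PySem.List.pyGetD xs (j : Int) 0 = xs[j] := by
  simp [PySem.List.pyGetD_natCast, List.getD_eq_getElem?_getD, List.getElem?_eq_getElem hj]

theorem pvGd_mono (xs : List Int) (hs : xs.Pairwise (· ≤ ·)) (i j : Nat)
    (hij : i ≤ j) (hj : j < xs.length) :
    PySem.List.pyGetD xs (i : Int) 0 ≤ PySem.List.pyGetD xs (j : Int) 0 := by
  rcases Nat.lt_or_ge i j with h | h
  · rw [pvGd_eq xs i (lt_trans h hj), pvGd_eq xs j hj]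
    exact List.pairwise_iff_getElem.mp hs i j _ _ h
  · have : i = j := le_antisymm hij h
    subst this; exact le_rfl

-- bisect correctness on a ≤-sorted list
theorem pvBis_spec (xs : List Int) (hs : xs.Pairwise (· ≤ ·)) (t : Int) :
    ∀ (n lo hi : Nat), hi - lo = n → lo ≤ hi → hi ≤ xs.length →
    lo ≤ pvBis xs t lo hi ∧ pvBis xs t lo hi ≤ hi ∧
      (∀ j, lo ≤ j → j < pvBis xs t lo hi → PySem.List.pyGetD xs (j : Int) 0 < t) ∧
      (∀ j, pvBis xs t lo hi ≤ j → j < hi → t ≤ PySem.List.pyGetD xs (j : Int) 0) := by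
  intro n
  induction n using Nat.strong_induction_on with
  | _ n ih =>
    intro lo hi hn hlo hhi
    rw [pvBis]
    by_cases h : lo < hi
    · simp only [dif_pos h]
      set mid := (lo + hi) / 2 with hmid
      have hmlt : mid < hi := by omega
      have hmge : lo ≤ mid := by omega
      have hmlen : mid < xs.length := lt_of_lt_of_le hmlt hhi
      by_cases hc : PySem.List.pyGetD xs (mid : Int) 0 < t
      · simp only [if_pos hc]
        obtain ⟨h1, h2, h3, h4⟩ := ih (hi - (mid + 1)) (by omega) (mid + 1) hi rfl (by omega) hhi
        refine ⟨by omega, h2, ?_, h4⟩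
        intro j hj1 hj2
        rcases Nat.lt_or_ge j (mid + 1) with hj | hj
        · exact lt_of_le_of_lt (pvGd_mono xs hs j mid (by omega) hmlen) hc
        · exact h3 j hj hj2
      · simp only [if_neg hc]
        obtain ⟨h1, h2, h3, h4⟩ := ih (mid - lo) (by omega) lo mid rfl hmge (le_of_lt hmlen)
        refine ⟨h1, by omega, h3, ?_⟩
        intro j hj1 hj2
        rcases Nat.lt_or_ge j mid with hj | hj
        · exact h4 j hj1 hj
        · exact le_trans (not_lt.mp hc) (pvGd_mono xs hs mid j hj (lt_of_lt_of_le hj2 hhi))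
    · simp only [dif_neg h]
      exact ⟨le_rfl, hlo, fun j h1 h2 => absurd h2 (by omega), fun j h1 h2 => absurd h2 (by omega)⟩

-- the bisect test equals A's "some lineNo lies in [a, b]"
theorem pvCond_iff (lineNos : List Int) (a b : Int) :
    ((pvBis (PySem.List.sorted lineNos (fun x => x) false) a 0
        (PySem.List.sorted lineNos (fun x => x) false).length)
        < (PySem.List.sorted lineNos (fun x => x) false).length ∧
      PySem.List.pyGetD (PySem.List.sorted lineNos (fun x => x) false)
        ((pvBis (PySem.List.sorted lineNos (fun x => x) false) a 0
          (PySem.List.sorted lineNos (fun x => x) false).length : Nat) : Int) 0 ≤ b) ↔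
      ∃ y ∈ lineNos, a ≤ y ∧ y ≤ b := by
  set sln := PySem.List.sorted lineNos (fun x => x) false with hsln
  have hs : sln.Pairwise (· ≤ ·) := by
    simpa using PySem.List.sorted_pairwise lineNos (fun x => x)
  have hmem : ∀ y, y ∈ sln ↔ y ∈ lineNos := fun y => PySem.List.mem_sorted _ _ _ _
  set i := pvBis sln a 0 sln.length with hi
  obtain ⟨h1, h2, h3, h4⟩ := pvBis_spec sln hs a (sln.length - 0) 0 sln.length rfl (Nat.zero_le _) le_rfl
  constructor
  · rintro ⟨hlt, hle⟩
    refine ⟨PySem.List.pyGetD sln (i : Int) 0, ?_, h4 i le_rfl hlt, hle⟩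
    rw [pvGd_eq sln i hlt]
    exact (hmem _).mp (List.getElem_mem hlt)
  · rintro ⟨y, hy, hay, hyb⟩
    obtain ⟨j, hj, hjy⟩ := List.mem_iff_getElem.mp ((hmem y).mpr hy)
    have hij : i ≤ j := by
      by_contra hlt
      have := h3 j (Nat.zero_le _) (not_le.mp hlt)
      rw [pvGd_eq sln j hj, hjy] at this
      omega
    have hilt : i < sln.length := lt_of_le_of_lt hij hj
    refine ⟨hilt, ?_⟩
    calc PySem.List.pyGetD sln (i : Int) 0 ≤ PySem.List.pyGetD sln (j : Int) 0 :=
          pvGd_mono sln hs i j hij hj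
      _ = y := by rw [pvGd_eq sln j hj, hjy]
      _ ≤ b := hyb

-- ===== VERDICT (by name: the statement is the Claim_ definition above) =====
theorem detailsExtraction_spec : Claim_equal_detailsExtraction := by
  intro lineNos loopList _hdom hpre
  show _ = detailsExtraction_alt lineNos loopList
  unfold detailsExtraction detailsExtraction_alt
  rw [PySem.List.sorted_id_eq_sorted_id_iff_perm]
  apply (List.perm_ext_iff_of_nodup (PySem.Set.nodup_ofList _)
    (pvB_nodup _ _ _ (PySem.Set.nodup_ofList _))).mpr
  intro x
  rw [PySem.Set.mem_ofList, pvA_mem loopList hpre lineNos [] x,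
    pvB_mem (fun loop => pvBis (PySem.List.sorted lineNos (fun x => x) false)
        (PySem.List.pyGetD loop 0 0) 0 (PySem.List.sorted lineNos (fun x => x) false).length
        < (PySem.List.sorted lineNos (fun x => x) false).length ∧
      PySem.List.pyGetD (PySem.List.sorted lineNos (fun x => x) false)
        ((pvBis (PySem.List.sorted lineNos (fun x => x) false) (PySem.List.pyGetD loop 0 0) 0
          (PySem.List.sorted lineNos (fun x => x) false).length : Nat) : Int) 0
        ≤ PySem.List.pyGetD loop (-1) 0)]
  simp only [List.not_mem_nil, false_or, PySem.Set.mem_ofList]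
  apply or_congr_right
  apply exists_congr; intro lp
  apply and_congr_right; intro _
  apply and_congr_left; intro _
  exact (pvCond_iff lineNos (PySem.List.pyGetD lp 0 0) (PySem.List.pyGetD lp (-1) 0)).symm
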